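-- pv_equiv track=rewrite | github.com/amplab/ray-core | src/mojo/devtools/common/devtoolslib/android_shell.py | parse_adb_devices_output
-- ===== SOURCE A (Python) =====
-- _ADB_DEVICES_HEADER = 'List of devices attached'
--
-- def parse_adb_devices_output(adb_devices_output):
--   """Parses the output of the `adb devices` command, returning a dictionary
--   mapping device id to the status of the device, as printed by `adb devices`.
--   """
--   # Split into lines skipping empty ones.
--   lines = [line.strip() for line in adb_devices_output.split('\n')
--            if line.strip()]
--
--   if _ADB_DEVICES_HEADER not in lines:
--     return None
--
--   # The header can be preceeded by output informing of adb server being spawned,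
--   # but all non-empty lines after the header describe connected devices.
--   device_specs = lines[lines.index(_ADB_DEVICES_HEADER) + 1:]
--   split_specs = [spec.split() for spec in device_specs]
--   return {split_spec[0]: split_spec[1] for split_spec in split_specs
--           if len(split_spec) == 2}
-- ===== SOURCE B (Python) =====
-- _ADB_DEVICES_HEADER = 'List of devices attached'
--
-- def parse_adb_devices_output(adb_devices_output):
--   """Single pass: latch on the first header line, then collect id->status."""
--   seen_header = False
--   result = {}
--   for line in adb_devices_output.split('\n'):
--     stripped = line.strip()
--     if not stripped:
--       continue
--     if not seen_header:
--       if stripped == _ADB_DEVICES_HEADER: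
--         seen_header = True
--     else:
--       fields = stripped.split()
--       if len(fields) == 2:
--         result[fields[0]] = fields[1]
--   return result if seen_header else None
-- ===== Notes on version B (the rewrite author's own statement) =====
-- stated objective: simpler
-- what changed: A builds a stripped-lines list, tests header membership, recomputes its index, slices, splits each spec and builds the dict by comprehension; B is a single stateful pass over the raw lines with a latching seen-header flag that inserts id->status pairs as it goes.
import Mathlib
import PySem

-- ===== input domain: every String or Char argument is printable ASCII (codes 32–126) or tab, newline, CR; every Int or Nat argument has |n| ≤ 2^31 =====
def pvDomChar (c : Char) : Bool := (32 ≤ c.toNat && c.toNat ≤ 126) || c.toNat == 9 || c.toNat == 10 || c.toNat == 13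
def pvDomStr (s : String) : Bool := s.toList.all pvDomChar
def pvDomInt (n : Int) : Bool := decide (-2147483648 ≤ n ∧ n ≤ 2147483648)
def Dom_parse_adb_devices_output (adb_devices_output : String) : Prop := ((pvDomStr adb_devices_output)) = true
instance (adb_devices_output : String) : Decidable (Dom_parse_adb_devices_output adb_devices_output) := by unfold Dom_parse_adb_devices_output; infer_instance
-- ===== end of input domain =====

-- B replaces A's strip/filter list, membership test, .index and slice phases with one
-- latching single-pass fold over the raw lines (objective: simpler one-pass decomposition).

-- ===== PORT A =====
def pvHeader : String := "List of devices attached"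

-- 'header not in lines' followed by 'lines.index(header)' is ported as one match on
-- PySem.List.index? (some i ↔ membership, i = first index, exactly Python's .index).
-- s.split('\n') never raises for the nonempty literal separator, so split? is always some.
def parse_adb_devices_output (adb_devices_output : String) : Option (List (String × String)) :=
  let lines := ((PySem.Str.split? adb_devices_output "\n").getD []).filterMap
    (fun line => let t := PySem.Str.strip line; if t = "" then none else some t)
  match PySem.List.index? lines pvHeader with
  | none => none
  | some i =>
    let device_specs := PySem.List.slice lines (some ((i : Int) + 1)) none
    let split_specs := device_specs.map PySem.Str.split₀
    some ((split_specs.foldl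
      (fun d sp => if sp.length = 2 then d.insert (sp.getD 0 "") (sp.getD 1 "") else d)
      (PySem.Dict.empty : PySem.Dict String String)).items)

-- ===== PORT B =====
-- The loop body of Source B (named so the proofs can speak about it).
def pvStepRaw (st : Bool × PySem.Dict String String) (line : String) : Bool × PySem.Dict String String :=
  let t := PySem.Str.strip line
  if t = "" then st
  else if st.1 = false then
    (if t = pvHeader then true else st.1, st.2)
  else
    let fields := PySem.Str.split₀ t
    if fields.length = 2 then (st.1, st.2.insert (fields.getD 0 "") (fields.getD 1 "")) else st

def parse_adb_devices_output_alt (adb_devices_output : String) : Option (List (String × String)) :=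
  let st := ((PySem.Str.split? adb_devices_output "\n").getD []).foldl
    pvStepRaw (false, (PySem.Dict.empty : PySem.Dict String String))
  if st.1 then some st.2.items else none

-- ===== PRECONDITION & SPEC =====
def Spec_parse_adb_devices_output (adb_devices_output : String) (out : Option (List (String × String))) : Prop := out = parse_adb_devices_output_alt adb_devices_output
instance (adb_devices_output : String) (out : Option (List (String × String))) : Decidable (Spec_parse_adb_devices_output adb_devices_output out) := by unfold Spec_parse_adb_devices_output; infer_instance

-- ===== CLAIM (what is proved, stated in full; the proofs are below) =====
def Claim_equal_parse_adb_devices_output : Prop := ∀ (adb_devices_output : String), Dom_parse_adb_devices_output adb_devices_output → Spec_parse_adb_devices_output adb_devices_output (parse_adb_devices_output adb_devices_output)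

-- ===== LEMMAS AND PROOFS =====

-- B's step on an already-stripped, nonempty line.
def pvStep (st : Bool × PySem.Dict String String) (t : String) : Bool × PySem.Dict String String :=
  if st.1 = false then
    (if t = pvHeader then true else st.1, st.2)
  else
    let fields := PySem.Str.split₀ t
    if fields.length = 2 then (st.1, st.2.insert (fields.getD 0 "") (fields.getD 1 "")) else st

-- A's dictionary accumulation over one device-spec line.
def pvAcc (d : PySem.Dict String String) (t : String) : PySem.Dict String String :=
  let sp := PySem.Str.split₀ t
  if sp.length = 2 then d.insert (sp.getD 0 "") (sp.getD 1 "") else d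

-- B's raw fold equals the clean fold over the stripped, nonempty lines.
theorem pv_bridge (ls : List String) (st : Bool × PySem.Dict String String) :
    ls.foldl pvStepRaw st
    = (ls.filterMap (fun line => let t := PySem.Str.strip line; if t = "" then none else some t)).foldl pvStep st := by
  induction ls generalizing st with
  | nil => rfl
  | cons l rest ih =>
    rw [List.foldl_cons, List.filterMap_cons]
    by_cases h : PySem.Str.strip l = ""
    · have h1 : pvStepRaw st l = st := by simp [pvStepRaw, h]
      rw [h1, ih]
      simp [h]
    · have h1 : pvStepRaw st l = pvStep st (PySem.Str.strip l) := by
        simp [pvStepRaw, pvStep, h]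
      rw [h1, ih]
      simp [h]

-- Once the header has been seen, the fold just accumulates device specs.
theorem pv_seen (lines : List String) (d : PySem.Dict String String) :
    lines.foldl pvStep (true, d) = (true, lines.foldl pvAcc d) := by
  induction lines generalizing d with
  | nil => rfl
  | cons t rest ih =>
    rw [List.foldl_cons, List.foldl_cons]
    have h1 : pvStep (true, d) t = (true, pvAcc d t) := by
      by_cases hl : (PySem.Str.split₀ t).length = 2 <;> simp [pvStep, pvAcc, hl]
    rw [h1, ih]

-- Before the header, the fold stays idle and latches at the first header occurrence.
theorem pv_unseen (lines : List String) (d : PySem.Dict String String) :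
    lines.foldl pvStep (false, d)
    = match PySem.List.index? lines pvHeader with
      | none => (false, d)
      | some i => (true, (lines.drop (i + 1)).foldl pvAcc d) := by
  induction lines generalizing d with
  | nil => rfl
  | cons t rest ih =>
    by_cases h : t = pvHeader
    · subst h
      rw [PySem.List.index?_cons_self, List.foldl_cons]
      have h1 : pvStep (false, d) pvHeader = (true, d) := by simp [pvStep]
      rw [h1, pv_seen]
      rfl
    · rw [PySem.List.index?_cons_of_ne rest h, List.foldl_cons]
      have h1 : pvStep (false, d) t = (false, d) := by simp [pvStep, h]
      rw [h1, ih]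
      cases hix : PySem.List.index? rest pvHeader with
      | none => rfl
      | some i => simp [List.drop_succ_cons]

-- ===== VERDICT (by name: the statement is the Claim_ definition above) =====
theorem parse_adb_devices_output_spec : Claim_equal_parse_adb_devices_output := by
  intro s _
  unfold Spec_parse_adb_devices_output
  simp only [parse_adb_devices_output, parse_adb_devices_output_alt]
  rw [pv_bridge, pv_unseen]
  generalize (((PySem.Str.split? s "\n").getD []).filterMap
      (fun line => let t := PySem.Str.strip line; if t = "" then none else some t)) = lines
  cases hix : PySem.List.index? lines pvHeader with
  | none => rfl
  | some i =>
    have hslice : PySem.List.slice lines (some ((i : Int) + 1)) none = lines.drop (i + 1) := by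
      have h := PySem.List.slice_from_natCast lines (i + 1)
      simpa using h
    simp only [hslice, List.foldl_map]
    rfl
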